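-- pv_equiv track=rewrite | github.com/rodrigodesalvobraz/whatsapp-chat-viewer | whatsapp_viewer.py | build_sender_classes
-- ===== SOURCE A (Python) =====
-- def build_sender_classes(messages, me_name=None):
--     """
--     Assign 'sent' (right) or 'received' (left) to each sender.
--     """
--     sender_classes = {}
--
--     if me_name:
--         for msg in messages:
--             s = msg["sender"]
--             if not s:
--                 continue
--             if s == me_name:
--                 sender_classes[s] = "sent"
--             elif s not in sender_classes:
--                 sender_classes[s] = "received"
--         return sender_classes
--
--     first = None
--     second = None
--     for msg in messages:
--         s = msg["sender"]
--         if not s: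
--             continue
--         if first is None:
--             first = s
--             sender_classes[s] = "received"
--         elif second is None and s != first:
--             second = s
--             sender_classes[s] = "sent"
--         elif s not in sender_classes:
--             sender_classes[s] = "received"
--
--     return sender_classes
-- ===== SOURCE B (Python) =====
-- def build_sender_classes(messages, me_name=None):
--     """
--     Assign 'sent' (right) or 'received' (left) to each sender.
--     """
--     seen = set()
--     uniques = []
--     for msg in messages:
--         s = msg["sender"]
--         if s and s not in seen:
--             seen.add(s)
--             uniques.append(s)
--     classes = {s: "received" for s in uniques}
--     if me_name:
--         if me_name in classes:
--             classes[me_name] = "sent"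
--     elif len(uniques) >= 2:
--         classes[uniques[1]] = "sent"
--     return classes
-- ===== Notes on version B (the rewrite author's own statement) =====
-- stated objective: alternative
-- what changed: Replaces A's stateful single-pass loop (dict + first/second sentinels with 3 branches, and a separate loop for the me_name case) by a two-phase decomposition: one dedup pass collecting distinct non-empty senders in first-occurrence order, then a uniform 'received' dict comprehension with a single targeted 'sent' override (me_name if present, else the second unique sender).
import Mathlib
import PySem

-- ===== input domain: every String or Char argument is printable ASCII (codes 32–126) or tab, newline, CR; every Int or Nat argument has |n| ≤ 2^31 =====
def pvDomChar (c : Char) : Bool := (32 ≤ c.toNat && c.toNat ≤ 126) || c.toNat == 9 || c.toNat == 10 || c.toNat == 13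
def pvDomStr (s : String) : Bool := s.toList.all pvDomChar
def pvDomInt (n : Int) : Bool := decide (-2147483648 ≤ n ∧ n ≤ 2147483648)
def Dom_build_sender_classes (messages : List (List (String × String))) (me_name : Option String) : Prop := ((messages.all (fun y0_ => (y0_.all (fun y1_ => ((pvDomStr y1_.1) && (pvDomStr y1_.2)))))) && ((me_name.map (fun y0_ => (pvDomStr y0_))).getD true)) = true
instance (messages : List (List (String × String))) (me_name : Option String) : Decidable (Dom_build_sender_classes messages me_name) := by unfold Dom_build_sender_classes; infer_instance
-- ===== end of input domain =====

-- B replaces A's stateful first/second single-pass classification with a dedup pass followed by a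
-- uniform 'received' map and one targeted 'sent' override (alternative decomposition, same cost).

-- msg["sender"]: Pre_ guarantees the key is present, so the "" default (Python's KeyError case) is
-- never taken on admitted inputs.
def pvSender (msg : List (String × String)) : String :=
  ((PySem.Dict.mk msg).get? "sender").getD ""

-- ===== PORT A =====
def build_sender_classes (messages : List (List (String × String))) (me_name : Option String) : List (String × String) :=
  if me_name.getD "" ≠ "" then
    -- 'if me_name:' branch: one dict loop keyed on comparison with me_name
    (messages.foldl
      (fun d msg =>
        if pvSender msg = "" then d
        else if pvSender msg = me_name.getD "" then d.insert (pvSender msg) "sent"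
        else if d.contains (pvSender msg) then d
        else d.insert (pvSender msg) "received")
      PySem.Dict.empty).items
  else
    -- falsy me_name: loop with first/second sentinels
    (messages.foldl
      (fun (st : PySem.Dict String String × Option String × Option String) msg =>
        if pvSender msg = "" then st
        else
          match st.2.1 with
          | none => (st.1.insert (pvSender msg) "received", some (pvSender msg), st.2.2)
          | some f =>
            if st.2.2 = none ∧ pvSender msg ≠ f then
              (st.1.insert (pvSender msg) "sent", some f, some (pvSender msg))
            else if st.1.contains (pvSender msg) then st
            else (st.1.insert (pvSender msg) "received", some f, st.2.2))
      (PySem.Dict.empty, none, none)).1.items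

-- ===== PORT B =====
def build_sender_classes_alt (messages : List (List (String × String))) (me_name : Option String) : List (String × String) :=
  -- pass 1: distinct non-empty senders in first-occurrence order (Source B's seen-set + append loop is a set build)
  let uniques : PySem.Set String :=
    messages.foldl
      (fun u msg => if pvSender msg = "" then u else PySem.Set.add u (pvSender msg))
      PySem.Set.empty
  -- {s: "received" for s in uniques}
  let classes : PySem.Dict String String :=
    uniques.foldl (fun d s => d.insert s "received") PySem.Dict.empty
  -- pass 2: one targeted 'sent' override
  (if me_name.getD "" ≠ "" then
     if classes.contains (me_name.getD "") then classes.insert (me_name.getD "") "sent" else classes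
   else
     match uniques with
     | _ :: b :: _ => classes.insert b "sent"   -- len(uniques) >= 2: classes[uniques[1]] = "sent"
     | _ => classes).items

-- ===== PRECONDITION & SPEC =====
-- Pre_ excludes exactly the inputs where some message lacks a "sender" key: there Python A (and B) raise KeyError.
def Pre_build_sender_classes (messages : List (List (String × String))) (me_name : Option String) : Prop :=
  messages.all (fun msg => (PySem.Dict.mk msg).contains "sender") = true
instance (messages : List (List (String × String))) (me_name : Option String) : Decidable (Pre_build_sender_classes messages me_name) := by unfold Pre_build_sender_classes; infer_instance
def pvWitness_build_sender_classes : (List (List (String × String))) × Option String :=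
  ([[("sender", "alice")], [("sender", "bob")], [("sender", "alice")]], some "alice")

def Spec_build_sender_classes (messages : List (List (String × String))) (me_name : Option String) (out : List (String × String)) : Prop := out = build_sender_classes_alt messages me_name
instance (messages : List (List (String × String))) (me_name : Option String) (out : List (String × String)) : Decidable (Spec_build_sender_classes messages me_name out) := by unfold Spec_build_sender_classes; infer_instance

-- ===== CLAIM (what is proved, stated in full; the proofs are below) =====
def Claim_equal_build_sender_classes : Prop := ∀ (messages : List (List (String × String))) (me_name : Option String), Dom_build_sender_classes messages me_name → Pre_build_sender_classes messages me_name → Spec_build_sender_classes messages me_name (build_sender_classes messages me_name)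

-- ===== LEMMAS AND PROOFS =====

-- the non-empty senders, in message order: both ports' loops only act on these
def pvSenders (messages : List (List (String × String))) : List String :=
  (messages.map pvSender).filter (fun s => !(s == ""))

theorem foldl_sender_filter {α : Type} (g : α → String → α)
    (messages : List (List (String × String))) (init : α) :
    messages.foldl (fun acc msg => if pvSender msg = "" then acc else g acc (pvSender msg)) init
      = (pvSenders messages).foldl g init := by
  induction messages generalizing init with
  | nil => rfl
  | cons m t ih =>
    by_cases h : pvSender m = "" <;>
      simp [pvSenders, h, List.foldl_cons] <;>
      exact ih _

-- A's me_name-branch loop, characterised on an arbitrary sender list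
theorem meFold_eq (m : String) (l : List String) :
    l.foldl
        (fun d s => if s = m then d.insert s "sent"
                    else if d.contains s then d else d.insert s "received")
        PySem.Dict.empty
      = PySem.Dict.mk ((PySem.Set.ofList l).map
          (fun s => (s, if s = m then "sent" else "received"))) := by
  induction l using List.reverseRecOn with
  | nil => rfl
  | append_singleton t s ih =>
    rw [List.foldl_append, ih, List.foldl_cons, List.foldl_nil,
        PySem.Set.ofList_append_singleton, PySem.Set.add_eq_ite]
    have hkeys : (PySem.Dict.mk ((PySem.Set.ofList t).map
        (fun s => (s, if s = m then "sent" else "received")))).keys = PySem.Set.ofList t := by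
      simp [PySem.Dict.keys_mk, Function.comp_def]
    by_cases hmem : s ∈ PySem.Set.ofList t
    · have hcont : (PySem.Dict.mk ((PySem.Set.ofList t).map
          (fun s => (s, if s = m then "sent" else "received")))).contains s = true := by
        rw [PySem.Dict.contains_eq_decide_mem_keys, hkeys]; simpa using hmem
      rw [if_pos hmem]
      by_cases hs : s = m
      · rw [if_pos hs]
        apply PySem.Dict.ext
        rw [PySem.Dict.items_insert_of_contains _ _ hcont]
        simp only [List.map_map]
        apply List.map_congr_left
        intro a _
        subst hs
        by_cases ha : a = s <;> simp [ha, Function.comp]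
      · rw [if_neg hs, if_pos hcont]
    · have hcont : (PySem.Dict.mk ((PySem.Set.ofList t).map
          (fun s => (s, if s = m then "sent" else "received")))).contains s = false := by
        rw [PySem.Dict.contains_eq_decide_mem_keys, hkeys]; simpa using hmem
      rw [if_neg hmem]
      by_cases hs : s = m
      · rw [if_pos hs]
        apply PySem.Dict.ext
        rw [PySem.Dict.items_insert_of_not_contains _ _ hcont]
        simp [hs]
      · rw [if_neg hs, if_neg (by simp [hcont]), ]
        apply PySem.Dict.ext
        rw [PySem.Dict.items_insert_of_not_contains _ _ hcont]
        simp [hs]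


-- B's comprehension: all-'received' dict on a Nodup key list
theorem recvFold_eq (u : List String) (hu : u.Nodup) :
    (u.foldl (fun d s => d.insert s "received") (PySem.Dict.empty : PySem.Dict String String)).items
      = u.map (fun s => (s, "received")) := by
  have := PySem.Dict.items_foldl_insert_fresh u (fun s => s) (fun _ => "received")
    (PySem.Dict.empty : PySem.Dict String String)
    (by intro a _; simp [PySem.Dict.empty, PySem.Dict.contains]) (by simpa using hu)
  simpa [PySem.Dict.empty] using this

-- A's falsy-me_name loop, characterised on an arbitrary sender list
def pvTag : List String → List (String × String)
  | [] => []
  | [a] => [(a, "received")]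
  | a :: b :: r => (a, "received") :: (b, "sent") :: r.map (fun s => (s, "received"))

def pvFst : List String → Option String
  | [] => none
  | a :: _ => some a

def pvSnd : List String → Option String
  | [] => none
  | [_] => none
  | _ :: b :: _ => some b

theorem pvTag_keys (u : List String) : (pvTag u).map (fun p => p.1) = u := by
  match u with
  | [] => rfl
  | [a] => rfl
  | a :: b :: r => simp [pvTag, List.map_map, Function.comp_def]

theorem pairFold_eq (l : List String) :
    l.foldl
        (fun (st : PySem.Dict String String × Option String × Option String) s =>
          match st.2.1 with
          | none => (st.1.insert s "received", some s, st.2.2)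
          | some f =>
            if st.2.2 = none ∧ s ≠ f then (st.1.insert s "sent", some f, some s)
            else if st.1.contains s then st
            else (st.1.insert s "received", some f, st.2.2))
        (PySem.Dict.empty, none, none)
      = (PySem.Dict.mk (pvTag (PySem.Set.ofList l)),
         pvFst (PySem.Set.ofList l), pvSnd (PySem.Set.ofList l)) := by
  induction l using List.reverseRecOn with
  | nil => rfl
  | append_singleton t s ih =>
    rw [List.foldl_append, ih, List.foldl_cons, List.foldl_nil,
        PySem.Set.ofList_append_singleton, PySem.Set.add_eq_ite]
    have hcont : ∀ u : List String,
        (PySem.Dict.mk (pvTag u)).contains s = decide (s ∈ u) := by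
      intro u
      rw [PySem.Dict.contains_eq_decide_mem_keys]
      simp [PySem.Dict.keys_mk, pvTag_keys]
    match hU : PySem.Set.ofList t with
    | [] =>
      simp only [pvFst, pvSnd]
      rw [if_neg (List.not_mem_nil)]
      refine Prod.ext ?_ (by simp)
      apply PySem.Dict.ext
      rw [show (PySem.Dict.mk (pvTag ([] : List String))) = PySem.Dict.empty from rfl]
      rw [PySem.Dict.items_insert_of_not_contains _ _ (by simp [PySem.Dict.contains, PySem.Dict.empty])]
      simp [pvTag, PySem.Dict.empty]
    | [a] =>
      simp only [pvFst, pvSnd]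
      by_cases hs : s = a
      · subst hs
        rw [if_pos (show s ∈ [s] by simp)]
        simp [hcont]
      · rw [if_neg (show s ∉ [a] by simp [hs])]
        rw [if_pos (show (True ∧ s ≠ a) from ⟨trivial, hs⟩)]
        refine Prod.ext ?_ (by simp)
        apply PySem.Dict.ext
        rw [PySem.Dict.items_insert_of_not_contains _ _ (by rw [hcont [a]]; simp [hs])]
        simp [pvTag]
    | a :: b :: r =>
      simp only [pvFst, pvSnd]
      rw [if_neg (show ¬((some b : Option String) = none ∧ s ≠ a) by simp)]
      by_cases hmem : s ∈ a :: b :: r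
      · rw [if_pos hmem]
        rw [if_pos (show (PySem.Dict.mk (pvTag (a :: b :: r))).contains s = true by
          rw [hcont]; exact decide_eq_true hmem)]
      · rw [if_neg hmem]
        rw [if_neg (show ¬(PySem.Dict.mk (pvTag (a :: b :: r))).contains s = true by
          rw [hcont]; simp [hmem])]
        refine Prod.ext ?_ (by simp)
        apply PySem.Dict.ext
        rw [PySem.Dict.items_insert_of_not_contains _ _ (by rw [hcont]; simp [hmem])]
        simp [pvTag]

-- ===== VERDICT (by name: the statement is the Claim_ definition above) =====
-- B's all-'received' dict over the distinct senders, as a Dict literal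
theorem recvDict_eq (u : List String) (hu : u.Nodup) :
    u.foldl (fun d s => d.insert s "received") (PySem.Dict.empty : PySem.Dict String String)
      = PySem.Dict.mk (u.map (fun s => (s, "received"))) :=
  PySem.Dict.ext (recvFold_eq u hu)

theorem alt_me_eq (l : List String) (m : String) :
    (if (PySem.Dict.mk ((PySem.Set.ofList l).map (fun s => (s, "received")))).contains m
     then (PySem.Dict.mk ((PySem.Set.ofList l).map (fun s => (s, "received")))).insert m "sent"
     else PySem.Dict.mk ((PySem.Set.ofList l).map (fun s => (s, "received"))))
      = PySem.Dict.mk ((PySem.Set.ofList l).map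
          (fun s => (s, if s = m then "sent" else "received"))) := by
  have hkeys : (PySem.Dict.mk ((PySem.Set.ofList l).map (fun s => (s, "received")))).keys
      = PySem.Set.ofList l := by
    simp [PySem.Dict.keys_mk, Function.comp_def]
  by_cases hm : m ∈ PySem.Set.ofList l
  · rw [if_pos (by rw [PySem.Dict.contains_eq_decide_mem_keys, hkeys]; exact decide_eq_true hm)]
    apply PySem.Dict.ext
    rw [PySem.Dict.items_insert_of_contains _ _
      (by rw [PySem.Dict.contains_eq_decide_mem_keys, hkeys]; exact decide_eq_true hm)]
    simp only [List.map_map]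
    apply List.map_congr_left
    intro a _
    by_cases ha : a = m <;> simp [ha, Function.comp]
  · rw [if_neg (by rw [PySem.Dict.contains_eq_decide_mem_keys, hkeys]; simp [hm])]
    apply PySem.Dict.ext
    apply List.map_congr_left
    intro a hamem
    have : a ≠ m := fun h => hm (h ▸ hamem)
    simp [this]

theorem alt_pair_eq (l : List String) :
    (match PySem.Set.ofList l with
     | _ :: b :: _ =>
        (PySem.Dict.mk ((PySem.Set.ofList l).map (fun s => (s, "received")))).insert b "sent"
     | _ => PySem.Dict.mk ((PySem.Set.ofList l).map (fun s => (s, "received"))))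
      = PySem.Dict.mk (pvTag (PySem.Set.ofList l)) := by
  have hnd := PySem.Set.nodup_ofList (α := String) l
  match hU : PySem.Set.ofList l with
  | [] => rfl
  | [a] => rfl
  | a :: b :: r =>
    rw [hU] at hnd
    have hab : a ≠ b := by simp [List.nodup_cons] at hnd; tauto
    have hbr : b ∉ r := by simp [List.nodup_cons] at hnd; tauto
    apply PySem.Dict.ext
    rw [PySem.Dict.items_insert_of_contains _ _
      (by simp [PySem.Dict.contains])]
    simp only [pvTag, List.map_cons, List.map_map]
    simp [hab]
    intro t ht h
    exact hbr (h ▸ ht)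

-- ===== VERDICT (by name: the statement is the Claim_ definition above) =====
theorem build_sender_classes_spec : Claim_equal_build_sender_classes := by
  intro messages me_name _dom _pre
  unfold Spec_build_sender_classes build_sender_classes build_sender_classes_alt
  dsimp only []
  rw [foldl_sender_filter (g := fun (u : PySem.Set String) (s : String) => PySem.Set.add u s)]
  rw [show (PySem.Set.empty : PySem.Set String) = [] from rfl,
      ← PySem.Set.ofList_eq_foldl]
  rw [recvDict_eq _ (PySem.Set.nodup_ofList _)]
  by_cases hme : me_name.getD "" ≠ ""
  · rw [if_pos hme, if_pos hme]
    rw [foldl_sender_filter (g := fun (d : PySem.Dict String String) (s : String) =>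
      if s = me_name.getD "" then d.insert s "sent"
      else if d.contains s then d else d.insert s "received")]
    rw [meFold_eq, alt_me_eq]
  · rw [if_neg hme, if_neg hme]
    rw [foldl_sender_filter (g := fun (st : PySem.Dict String String × Option String × Option String) s =>
      match st.2.1 with
      | none => (st.1.insert s "received", some s, st.2.2)
      | some f =>
        if st.2.2 = none ∧ s ≠ f then (st.1.insert s "sent", some f, some s)
        else if st.1.contains s then st
        else (st.1.insert s "received", some f, st.2.2))]
    rw [pairFold_eq, alt_pair_eq]
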